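-- pv_equiv track=rewrite | github.com/miliar/Code_Jam_Webscraper | solutions_python/Problem_184/56.py | uniquely_determined
-- ===== SOURCE A (Python) =====
-- def uniquely_determined(words):
--     set_unique = {}
--     for word in words:
--         rest = set(c for w2 in words if w2 != word for c in w2)
--         unique = [c for c in word if c not in rest]
--         if unique:
--             set_unique[word] = unique
--     return set_unique
-- ===== SOURCE B (Python) =====
-- def uniquely_determined(words):
--     # one pass: owner[c] = the single word-value containing c, or None if
--     # two distinct word-values contain c
--     owner = {}
--     for w in words:
--         for c in w:
--             if c not in owner:
--                 owner[c] = w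
--             elif owner[c] != w:
--                 owner[c] = None
--     result = {}
--     for w in words:
--         if w not in result:
--             unique = [c for c in w if owner[c] == w]
--             if unique:
--                 result[w] = unique
--     return result
-- ===== Notes on version B (the rewrite author's own statement) =====
-- stated objective: faster
-- what changed: Instead of rebuilding, for every word, the set of all characters of all other words (a quadratic rescan), B makes one pass recording for each character the unique word-value containing it (or a None marker), then filters each word's characters against that map.
import Mathlib
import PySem

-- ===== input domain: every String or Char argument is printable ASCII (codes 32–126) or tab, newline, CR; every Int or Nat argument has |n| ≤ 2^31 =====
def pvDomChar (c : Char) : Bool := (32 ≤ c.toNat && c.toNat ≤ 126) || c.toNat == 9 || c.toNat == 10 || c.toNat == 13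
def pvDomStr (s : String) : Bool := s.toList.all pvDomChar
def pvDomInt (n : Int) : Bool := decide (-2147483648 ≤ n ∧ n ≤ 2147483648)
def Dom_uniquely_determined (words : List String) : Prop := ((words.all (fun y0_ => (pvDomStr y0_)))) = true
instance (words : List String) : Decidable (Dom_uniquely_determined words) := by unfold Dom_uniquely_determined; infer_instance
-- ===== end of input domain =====

-- B replaces A's per-word rescan of all other words by a single pass recording, per character,
-- the unique word-value containing it; same return value (objective: faster).

-- ===== PORT A =====
-- iterating a Python str yields its characters as 1-character strings
def pyChars (s : String) : List String := s.toList.map (fun ch => String.ofList [ch])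

def uniquely_determined (words : List String) : List (String × List String) :=
  (words.foldl (fun set_unique word =>
    let rest : PySem.Set String :=
      PySem.Set.ofList ((words.filter (fun w2 => w2 != word)).flatMap (fun w2 => pyChars w2))
    let unique := (pyChars word).filter (fun c => !(PySem.Set.contains rest c))
    if unique ≠ [] then set_unique.insert word unique else set_unique)
    (PySem.Dict.empty : PySem.Dict String (List String))).items

-- ===== PORT B =====
-- body of B's inner loop: 'if c not in owner: owner[c] = w elif owner[c] != w: owner[c] = None'
def udStep (w : String) (d : PySem.Dict String (Option String)) (c : String) : PySem.Dict String (Option String) :=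
  match d.get? c with
  | none => d.insert c (some w)
  | some v => if v ≠ some w then d.insert c none else d

def uniquely_determined_alt (words : List String) : List (String × List String) :=
  let owner : PySem.Dict String (Option String) :=
    words.foldl (fun d w => (pyChars w).foldl (udStep w) d) PySem.Dict.empty
  (words.foldl (fun result w =>
    if result.contains w then result
    else
      let unique := (pyChars w).filter (fun c => owner.getD c none == some w)
      if unique ≠ [] then result.insert w unique else result)
    (PySem.Dict.empty : PySem.Dict String (List String))).items

-- ===== PRECONDITION & SPEC =====
def Spec_uniquely_determined (words : List String) (out : List (String × List String)) : Prop := out = uniquely_determined_alt words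
instance (words : List String) (out : List (String × List String)) : Decidable (Spec_uniquely_determined words out) := by unfold Spec_uniquely_determined; infer_instance

-- ===== CLAIM (what is proved, stated in full; the proofs are below) =====
def Claim_equal_uniquely_determined : Prop := ∀ (words : List String), Dom_uniquely_determined words → Spec_uniquely_determined words (uniquely_determined words)

-- ===== LEMMAS AND PROOFS =====

-- A's per-word value: the word's characters occurring in no other word
def valA (words : List String) (word : String) : List String :=
  (pyChars word).filter (fun c => !(PySem.Set.contains
    (PySem.Set.ofList ((words.filter (fun w2 => w2 != word)).flatMap (fun w2 => pyChars w2))) c))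

-- B's owner map and per-word value
def ownerOf (words : List String) : PySem.Dict String (Option String) :=
  words.foldl (fun d w => (pyChars w).foldl (udStep w) d) PySem.Dict.empty

def valB (words : List String) (w : String) : List String :=
  (pyChars w).filter (fun c => (ownerOf words).getD c none == some w)

-- abstract effect of one udStep on the stored value at a key
def stepVal (o : Option (Option String)) (w : String) : Option (Option String) :=
  match o with
  | none => some (some w)
  | some v => if v ≠ some w then some none else some v

def runVal (o : Option (Option String)) : List String → Option (Option String)
  | [] => o
  | w :: ws => runVal (stepVal o w) ws

theorem get?_udStep (w : String) (d : PySem.Dict String (Option String)) (c c' : String) :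
    (udStep w d c').get? c = if c = c' then stepVal (d.get? c') w else d.get? c := by
  by_cases hc : c = c'
  · subst hc
    cases h : d.get? c with
    | none => simp [udStep, stepVal, h, PySem.Dict.get?_insert_self]
    | some v =>
      by_cases hv : v = some w
      · simp [udStep, stepVal, h, hv]
      · simp [udStep, stepVal, h, hv, PySem.Dict.get?_insert_self]
  · cases h : d.get? c' with
    | none => simp [udStep, h, PySem.Dict.get?_insert, hc]
    | some v =>
      by_cases hv : v = some w
      · simp [udStep, h, hv, hc]
      · simp [udStep, h, hv, PySem.Dict.get?_insert, hc]

theorem stepVal_idem (o : Option (Option String)) (w : String) :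
    stepVal (stepVal o w) w = stepVal o w := by
  cases o with
  | none => simp [stepVal]
  | some v => by_cases hv : v = some w <;> simp [stepVal, hv]

theorem get?_inner_fold (w : String) (cs : List String) (d : PySem.Dict String (Option String)) (c : String) :
    (cs.foldl (udStep w) d).get? c = if c ∈ cs then stepVal (d.get? c) w else d.get? c := by
  induction cs generalizing d with
  | nil => simp
  | cons c' cs ih =>
    simp only [List.foldl_cons]
    rw [ih, get?_udStep]
    by_cases h2 : c = c'
    · subst h2
      by_cases h1 : c ∈ cs <;> simp [h1, stepVal_idem]
    · by_cases h1 : c ∈ cs <;> simp [h1, h2]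

theorem get?_owner_fold (ws : List String) (d : PySem.Dict String (Option String)) (c : String) :
    (ws.foldl (fun d w => (pyChars w).foldl (udStep w) d) d).get? c
      = runVal (d.get? c) (ws.filter (fun w => decide (c ∈ pyChars w))) := by
  induction ws generalizing d with
  | nil => simp [runVal]
  | cons w ws ih =>
    simp only [List.foldl_cons, List.filter_cons]
    rw [ih, get?_inner_fold]
    by_cases h : c ∈ pyChars w
    · simp [h, runVal]
    · simp [h]

theorem runVal_some_none (ws : List String) : runVal (some none) ws = some none := by
  induction ws with
  | nil => rfl
  | cons w ws ih => simpa [runVal, stepVal] using ih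

theorem runVal_some_some (ws : List String) (w0 : String) :
    runVal (some (some w0)) ws = if ∀ w ∈ ws, w = w0 then some (some w0) else some none := by
  induction ws with
  | nil => simp [runVal]
  | cons w ws ih =>
    by_cases h : w = w0
    · subst h
      simp [runVal, stepVal, ih]
    · simp [runVal, stepVal, h, runVal_some_none, Ne.symm h]

theorem runVal_none_eq_iff (ws : List String) (w : String) :
    runVal none ws = some (some w) ↔ ws ≠ [] ∧ ∀ w2 ∈ ws, w2 = w := by
  cases ws with
  | nil => simp [runVal]
  | cons w0 ws =>
    show runVal (stepVal none w0) ws = some (some w) ↔ _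
    rw [show stepVal none w0 = some (some w0) from rfl, runVal_some_some]
    constructor
    · intro heq
      split_ifs at heq with h
      · obtain rfl : w0 = w := by simpa using heq
        exact ⟨by simp, by rw [List.forall_mem_cons]; exact ⟨rfl, h⟩⟩
      · simp at heq
    · rintro ⟨-, hall⟩
      have hw0 : w0 = w := hall w0 (by simp)
      have h : ∀ x ∈ ws, x = w0 := fun x hx => (hall x (by simp [hx])).trans hw0.symm
      rw [if_pos h, hw0]

theorem owner_get?_iff (words : List String) (c : String) (w : String) :
    (ownerOf words).get? c = some (some w)
      ↔ (∃ w0 ∈ words, c ∈ pyChars w0) ∧ ∀ w2 ∈ words, c ∈ pyChars w2 → w2 = w := by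
  unfold ownerOf
  rw [get?_owner_fold, PySem.Dict.get?_empty, runVal_none_eq_iff]
  have h1 : (words.filter (fun w => decide (c ∈ pyChars w)) ≠ []) ↔ ∃ w0 ∈ words, c ∈ pyChars w0 := by
    rw [ne_eq, List.filter_eq_nil_iff]
    push Not
    simp
  have h2 : (∀ w2 ∈ words.filter (fun w => decide (c ∈ pyChars w)), w2 = w)
      ↔ ∀ w2 ∈ words, c ∈ pyChars w2 → w2 = w := by
    simp [List.mem_filter]
  exact and_congr h1 h2

theorem val_eq (words : List String) (w : String) (hw : w ∈ words) :
    valB words w = valA words w := by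
  unfold valA valB
  apply List.filter_congr
  intro c hc
  have hL : PySem.Set.contains
      (PySem.Set.ofList ((words.filter (fun w2 => w2 != w)).flatMap (fun w2 => pyChars w2))) c = true
      ↔ ∃ w2 ∈ words, w2 ≠ w ∧ c ∈ pyChars w2 := by
    rw [PySem.Set.contains_iff, PySem.Set.mem_ofList]
    simp [List.mem_flatMap, List.mem_filter, and_assoc]
  have hG : ((ownerOf words).getD c none == some w) = true ↔ (ownerOf words).get? c = some (some w) := by
    rw [beq_iff_eq, PySem.Dict.getD_eq_get?_getD]
    cases hg : (ownerOf words).get? c with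
    | none => simp
    | some v => simp
  have hG' := hG.trans (owner_get?_iff words c w)
  by_cases h : ∀ w2 ∈ words, c ∈ pyChars w2 → w2 = w
  · have hb1 : ((ownerOf words).getD c none == some w) = true := hG'.mpr ⟨⟨w, hw, hc⟩, h⟩
    have hb2 : PySem.Set.contains
        (PySem.Set.ofList ((words.filter (fun w2 => w2 != w)).flatMap (fun w2 => pyChars w2))) c = false :=
      Bool.eq_false_iff.mpr (fun ht => by
        obtain ⟨w2, hw2, hne2, hc2⟩ := hL.mp ht
        exact hne2 (h w2 hw2 hc2))
    rw [hb1, hb2]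
    rfl
  · have hb1 : ((ownerOf words).getD c none == some w) = false :=
      Bool.eq_false_iff.mpr (fun ht => h (hG'.mp ht).2)
    push Not at h
    obtain ⟨w2, hw2, hc2, hne2⟩ := h
    have hb2 : PySem.Set.contains
        (PySem.Set.ofList ((words.filter (fun w2 => w2 != w)).flatMap (fun w2 => pyChars w2))) c = true :=
      hL.mpr ⟨w2, hw2, hne2, hc2⟩
    rw [hb1, hb2]
    rfl

theorem insert_self_of_get? {d : PySem.Dict String (List String)} {k : String} {v : List String}
    (hnd : d.keys.Nodup) (h : d.get? k = some v) : d.insert k v = d := by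
  apply PySem.Dict.ext
  rw [PySem.Dict.items_insert_of_contains d v (by rw [PySem.Dict.contains_eq_isSome_get?, h]; rfl)]
  conv_rhs => rw [← List.map_id d.items]
  apply List.map_congr_left
  intro p hp
  show (if (p.1 == k) = true then (k, v) else p) = p
  by_cases hpk : p.1 = k
  · rw [if_pos (by simp [hpk])]
    have hmem : (p.1, p.2) ∈ d.items := hp
    have hv : d.get? p.1 = some p.2 := PySem.Dict.get?_of_mem_items d hmem hnd
    rw [hpk, h] at hv
    obtain rfl : v = p.2 := by simpa using hv
    rw [← hpk]
  · rw [if_neg (by simp [hpk])]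

-- B's accumulation (with the 'already present' skip) equals A's, for a common value function,
-- on any start dict whose entries already agree with that value function
theorem foldAB (v : String → List String) (ws : List String) :
    ∀ (d : PySem.Dict String (List String)), d.keys.Nodup →
    (∀ k x, d.get? k = some x → x = v k) →
    ws.foldl (fun r w => if r.contains w then r
      else if v w ≠ [] then r.insert w (v w) else r) d
    = ws.foldl (fun r w => if v w ≠ [] then r.insert w (v w) else r) d := by
  induction ws with
  | nil => intro d _ _; rfl
  | cons w ws ih =>
    intro d hnd hinv
    simp only [List.foldl_cons]
    by_cases hc : d.contains w = true
    · rw [if_pos hc]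
      obtain ⟨x, hx⟩ : ∃ x, d.get? w = some x := by
        have hiso := PySem.Dict.contains_eq_isSome_get? d w
        rw [hc] at hiso
        cases hg : d.get? w with
        | none => rw [hg] at hiso; simp at hiso
        | some y => exact ⟨y, rfl⟩
      have hxv : x = v w := hinv w x hx
      subst hxv
      by_cases hv : v w ≠ []
      · rw [if_pos hv, insert_self_of_get? hnd hx]
        exact ih d hnd hinv
      · rw [if_neg hv]
        exact ih d hnd hinv
    · rw [if_neg hc]
      by_cases hv : v w ≠ []
      · rw [if_pos hv]
        apply ih
        · exact PySem.Dict.nodup_keys_insert d w (v w) hnd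
        · intro k x hk
          rw [PySem.Dict.get?_insert] at hk
          split_ifs at hk with hkw
          · subst hkw
            simpa using hk.symm
          · exact hinv k x hk
      · rw [if_neg hv]
        exact ih d hnd hinv

-- ===== VERDICT (by name: the statement is the Claim_ definition above) =====
theorem uniquely_determined_spec : Claim_equal_uniquely_determined := by
  intro words _
  unfold Spec_uniquely_determined
  have hA : uniquely_determined words
      = (words.foldl (fun r w => if valA words w ≠ [] then r.insert w (valA words w) else r)
          PySem.Dict.empty).items := rfl
  have hB : uniquely_determined_alt words
      = (words.foldl (fun r w => if r.contains w then r
          else if valB words w ≠ [] then r.insert w (valB words w) else r)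
          PySem.Dict.empty).items := rfl
  have h1 : words.foldl (fun r w => if r.contains w then r
        else if valB words w ≠ [] then r.insert w (valB words w) else r) PySem.Dict.empty
      = words.foldl (fun r w => if r.contains w then r
        else if valA words w ≠ [] then r.insert w (valA words w) else r) PySem.Dict.empty := by
    apply PySem.List.foldl_congr_mem
    intro r w hw
    rw [val_eq words w hw]
  have h2 := foldAB (valA words) words PySem.Dict.empty PySem.Dict.nodup_keys_empty
    (by intro k x hk; rw [PySem.Dict.get?_empty] at hk; cases hk)
  rw [hA, hB, h1, h2]
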